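-- pv_equiv track=rewrite | github.com/ilyavfx/leetcode_everyday | solutions/2058_n2_find_extremum_distance.py | meathure_critical
-- ===== SOURCE A (Python) =====
-- def meathure_critical(critical) -> list[int]:
--     min_dist = len(critical)
--     max_dist = -1
--     for i in range(1, len(critical) - 1):
--         for j in range(i + 1, len(critical) - 1):
--             if critical[i] == 1 and critical[j] == 1:
--                 if abs(i - j) < min_dist:
--                     min_dist = abs(i - j)
--                 if abs(i - j) > max_dist:
--                     max_dist = abs(i - j)
--
--     if min_dist == len(critical):
--         min_dist = -1
--
--     return [min_dist, max_dist]
-- ===== SOURCE B (Python) =====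
-- def meathure_critical(critical) -> list[int]:
--     ones = [i for i in range(1, len(critical) - 1) if critical[i] == 1]
--     if len(ones) < 2:
--         return [-1, -1]
--     mn = ones[1] - ones[0]
--     for a, b in zip(ones[1:], ones[2:]):
--         mn = min(mn, b - a)
--     return [mn, ones[-1] - ones[0]]
-- ===== Notes on version B (the rewrite author's own statement) =====
-- stated objective: faster
-- what changed: Replaces the O(n^2) double loop over all index pairs by a single pass collecting the indices of 1s in [1, len-2]; the min distance is the minimum adjacent gap and the max distance is last minus first.
import Mathlib
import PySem

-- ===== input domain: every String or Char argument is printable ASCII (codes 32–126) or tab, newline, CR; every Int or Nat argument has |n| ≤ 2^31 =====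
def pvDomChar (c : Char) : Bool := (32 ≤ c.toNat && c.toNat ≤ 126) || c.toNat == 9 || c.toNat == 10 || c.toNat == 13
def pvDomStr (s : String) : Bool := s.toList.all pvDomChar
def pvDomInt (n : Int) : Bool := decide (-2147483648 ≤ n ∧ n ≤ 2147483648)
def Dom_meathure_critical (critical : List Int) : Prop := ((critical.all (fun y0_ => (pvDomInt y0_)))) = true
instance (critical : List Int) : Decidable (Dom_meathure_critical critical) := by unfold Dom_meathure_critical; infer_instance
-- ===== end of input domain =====

-- B replaces A's O(n^2) double loop over index pairs by one pass collecting the 1-indices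
-- (min = minimum adjacent gap, max = last minus first); faster asymptotically.

-- ===== PORT A =====
def meathure_critical (critical : List Int) : List Int :=
  let n : Int := critical.length
  let st :=
    (PySem.List.pyRange 1 (n - 1) 1).foldl
      (fun (st : Int × Int) i =>
        (PySem.List.pyRange (i + 1) (n - 1) 1).foldl
          (fun (st : Int × Int) j =>
            if PySem.List.pyGet? critical i = some 1 ∧ PySem.List.pyGet? critical j = some 1 then
              let st1 := if |i - j| < st.1 then (|i - j|, st.2) else st
              if |i - j| > st1.2 then (st1.1, |i - j|) else st1
            else st)
          st)
      (n, -1)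
  [if st.1 = n then -1 else st.1, st.2]

-- ===== PORT B =====
-- ones[-1] on the nonempty suffix
def lastInt (d : Int) : List Int → Int
  | [] => d
  | a :: t => lastInt a t

def meathure_critical_alt (critical : List Int) : List Int :=
  let n : Int := critical.length
  let ones := (PySem.List.pyRange 1 (n - 1) 1).filter
      (fun i => decide (PySem.List.pyGet? critical i = some 1))
  match ones with
  | x :: y :: rest =>
      let mn := (List.zipWith (fun a b => b - a) (y :: rest) rest).foldl min (y - x)
      [mn, lastInt y rest - x]
  | _ => [-1, -1]

-- ===== PRECONDITION & SPEC =====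
def Spec_meathure_critical (critical : List Int) (out : List Int) : Prop := out = meathure_critical_alt critical
instance (critical : List Int) (out : List Int) : Decidable (Spec_meathure_critical critical out) := by unfold Spec_meathure_critical; infer_instance

-- ===== CLAIM (what is proved, stated in full; the proofs are below) =====
def Claim_equal_meathure_critical : Prop := ∀ (critical : List Int), Dom_meathure_critical critical → Spec_meathure_critical critical (meathure_critical critical)

-- ===== LEMMAS AND PROOFS =====

/-- A's (min,max) update, abstracted. -/
def pvStep (st : Int × Int) (g : Int) : Int × Int := (min st.1 g, max st.2 g)

/-- Gaps j - i over all ordered pairs i < j (by position) of a list. -/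
def pairGaps : List Int → List Int
  | [] => []
  | x :: xs => xs.map (fun z => z - x) ++ pairGaps xs

/-- Adjacent gaps. -/
def adjGaps (l : List Int) : List Int := List.zipWith (fun a b => b - a) l l.tail

theorem pvBodyA_eq (st : Int × Int) (d : Int) :
    (let st1 := if d < st.1 then (d, st.2) else st;
     if d > st1.2 then (st1.1, d) else st1) = pvStep st d := by
  unfold pvStep
  dsimp only
  split_ifs <;> simp_all [Prod.ext_iff, min_def, max_def] <;> omega

theorem pvFoldl_if_filter {σ : Type} (q : Int → Prop) [DecidablePred q] (f : σ → Int → σ) :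
    ∀ (l : List Int) (s : σ),
      l.foldl (fun s x => if q x then f s x else s) s
        = (l.filter (fun x => decide (q x))).foldl f s := by
  intro l
  induction l with
  | nil => intro s; rfl
  | cons a t ih =>
    intro s
    by_cases h : q a <;> simp [h, ih]

theorem pvFoldl_const {σ : Type} : ∀ (l : List Int) (s : σ), l.foldl (fun s _ => s) s = s := by
  intro l; induction l with
  | nil => intro s; rfl
  | cons a t ih => intro s; simp only [List.foldl_cons]; exact ih s

theorem pvFoldl_pvStep (G : List Int) :
    ∀ (s : Int × Int), G.foldl pvStep s = (G.foldl min s.1, G.foldl max s.2) := by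
  induction G with
  | nil => intro s; rfl
  | cons g t ih => intro s; simpa [pvStep] using ih (min s.1 g, max s.2 g)

theorem pvFoldl_min_all_ge : ∀ (l : List Int) (s : Int), (∀ e ∈ l, s ≤ e) → l.foldl min s = s := by
  intro l
  induction l with
  | nil => intro s _; rfl
  | cons a t ih =>
    intro s h
    have hs : min s a = s := min_eq_left (h a (by simp))
    simp only [List.foldl_cons, hs]
    exact ih s (fun e he => h e (by simp [he]))

theorem pvFoldl_min_le : ∀ (l : List Int) (s : Int), l.foldl min s ≤ s := by
  intro l
  induction l with
  | nil => intro s; exact le_refl s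
  | cons a t ih =>
    intro s
    calc (a :: t).foldl min s = t.foldl min (min s a) := rfl
    _ ≤ min s a := ih _
    _ ≤ s := min_le_left _ _

theorem pvFoldl_max_all_le : ∀ (l : List Int) (s : Int), (∀ e ∈ l, e ≤ s) → l.foldl max s = s := by
  intro l
  induction l with
  | nil => intro s _; rfl
  | cons a t ih =>
    intro s h
    have hs : max s a = s := max_eq_left (h a (by simp))
    simp only [List.foldl_cons, hs]
    exact ih s (fun e he => h e (by simp [he]))

theorem pvFoldl_max_of_mem : ∀ (l : List Int) (s m : Int), m ∈ l → (∀ e ∈ l, e ≤ m) →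
    l.foldl max s = max s m := by
  intro l
  induction l with
  | nil => intro s m hm; simp at hm
  | cons a t ih =>
    intro s m hm hle
    by_cases ht : m ∈ t
    · have := ih (max s a) m ht (fun e he => hle e (by simp [he]))
      simp only [List.foldl_cons, this]
      have ha : a ≤ m := hle a (by simp)
      omega
    · have hma : m = a := by rcases List.mem_cons.mp hm with h | h; exact h; exact absurd h ht
      subst hma
      simp only [List.foldl_cons]
      exact pvFoldl_max_all_le t (max s m) (fun e he => le_trans (hle e (by simp [he])) (le_max_right _ _))

theorem pvLast_mem : ∀ (t : List Int) (y : Int), lastInt y t ∈ y :: t := by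
  intro t
  induction t with
  | nil => intro y; simp [lastInt]
  | cons a t' ih =>
    intro y
    have := ih a
    simp only [lastInt]
    rcases List.mem_cons.mp this with h | h
    · simp [h]
    · simp [h]

theorem pvLast_ge : ∀ (t : List Int) (y : Int), (y :: t).Pairwise (· < ·) →
    ∀ z ∈ y :: t, z ≤ lastInt y t := by
  intro t
  induction t with
  | nil => intro y _ z hz; simp at hz; simp [hz, lastInt]
  | cons a t' ih =>
    intro y hp z hz
    have hp' : (a :: t').Pairwise (· < ·) := hp.tail
    have hya : y < a := (List.pairwise_cons.mp hp).1 a (by simp)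
    simp only [lastInt]
    rcases List.mem_cons.mp hz with h | h
    · subst h
      exact le_trans (le_of_lt hya) (ih a hp' a (by simp))
    · exact ih a hp' z h

theorem pvPairGaps_min : ∀ (l : List Int), l.Pairwise (· < ·) →
    ∀ c : Int, (pairGaps l).foldl min c = (adjGaps l).foldl min c := by
  intro l
  induction l with
  | nil => intro _ c; rfl
  | cons x t ih =>
    intro hp c
    cases t with
    | nil => rfl
    | cons y rest =>
      have hxy : x < y := (List.pairwise_cons.mp hp).1 y (by simp)
      have hxr : ∀ z ∈ rest, x < z := fun z hz => (List.pairwise_cons.mp hp).1 z (by simp [hz])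
      have hyr : ∀ z ∈ rest, y < z := fun z hz =>
        (List.pairwise_cons.mp hp.tail).1 z hz
      have hmap : ((y :: rest).map (fun z => z - x)).foldl min c = min c (y - x) := by
        simp only [List.map_cons, List.foldl_cons]
        exact pvFoldl_min_all_ge _ _ (by
          intro e he
          rcases List.mem_map.mp he with ⟨z, hz, rfl⟩
          have := hyr z hz
          have : y - x ≤ z - x := by omega
          exact le_trans (min_le_right _ _) this)
      have hadj : adjGaps (x :: y :: rest) = (y - x) :: adjGaps (y :: rest) := by
        simp [adjGaps]
      calc (pairGaps (x :: y :: rest)).foldl min c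
          = (pairGaps (y :: rest)).foldl min (((y :: rest).map (fun z => z - x)).foldl min c) := by
            simp [pairGaps, List.foldl_append]
        _ = (pairGaps (y :: rest)).foldl min (min c (y - x)) := by rw [hmap]
        _ = (adjGaps (y :: rest)).foldl min (min c (y - x)) := ih hp.tail _
        _ = (adjGaps (x :: y :: rest)).foldl min c := by rw [hadj]; rfl

theorem pvPairGaps_max : ∀ (t : List Int) (x y c : Int), (x :: y :: t).Pairwise (· < ·) →
    (pairGaps (x :: y :: t)).foldl max c = max c (lastInt y t - x) := by
  intro t
  induction t with
  | nil =>
    intro x y c _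
    simp [pairGaps, lastInt]
  | cons a t' ih =>
    intro x y c hp
    have hxy : x < y := (List.pairwise_cons.mp hp).1 y (by simp)
    have hp' : (y :: a :: t').Pairwise (· < ·) := hp.tail
    have hL := pvLast_ge (a :: t') y hp'
    have hLmem := pvLast_mem (a :: t') y
    have hmap : ((y :: a :: t').map (fun z => z - x)).foldl max c
        = max c (lastInt y (a :: t') - x) := by
      apply pvFoldl_max_of_mem
      · exact List.mem_map.mpr ⟨lastInt y (a :: t'), hLmem, rfl⟩
      · intro e he
        rcases List.mem_map.mp he with ⟨z, hz, rfl⟩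
        have := hL z hz
        omega
    have hlast : lastInt y (a :: t') = lastInt a t' := rfl
    calc (pairGaps (x :: y :: a :: t')).foldl max c
        = (pairGaps (y :: a :: t')).foldl max (((y :: a :: t').map (fun z => z - x)).foldl max c) := by
          simp [pairGaps, List.foldl_append]
      _ = (pairGaps (y :: a :: t')).foldl max (max c (lastInt y (a :: t') - x)) := by rw [hmap]
      _ = max (max c (lastInt y (a :: t') - x)) (lastInt a t' - y) := ih y a _ hp'
      _ = max c (lastInt y (a :: t') - x) := by
          have h1 : a ≤ lastInt a t' := pvLast_ge t' a hp'.tail a (by simp)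
          have h2 : lastInt a t' - y ≤ lastInt a t' - x := by omega
          rw [hlast]
          omega

theorem pvFoldl_pairs : ∀ (l : List Int), l.Pairwise (· < ·) → ∀ (s : Int × Int),
    l.foldl (fun s i => (l.filter (fun j => decide (i < j))).foldl
        (fun s j => pvStep s (j - i)) s) s
      = (pairGaps l).foldl pvStep s := by
  intro l
  induction l with
  | nil => intro _ s; rfl
  | cons x t ih =>
    intro hp s
    have hxt : ∀ j ∈ t, x < j := (List.pairwise_cons.mp hp).1
    simp only [List.foldl_cons]
    have hfx : ((x :: t).filter (fun j => decide (x < j))) = t := by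
      simp only [List.filter_cons]
      rw [if_neg (by simp)]
      exact List.filter_eq_self.mpr (fun j hj => by simpa using hxt j hj)
    rw [hfx]
    have hbody : t.foldl (fun s i => ((x :: t).filter (fun j => decide (i < j))).foldl
          (fun s j => pvStep s (j - i)) s)
          (t.foldl (fun s j => pvStep s (j - x)) s)
        = t.foldl (fun s i => (t.filter (fun j => decide (i < j))).foldl
          (fun s j => pvStep s (j - i)) s)
          (t.foldl (fun s j => pvStep s (j - x)) s) := by
      apply PySem.List.foldl_congr_mem
      intro acc i hi
      have hxi : x < i := hxt i hi
      have : ((x :: t).filter (fun j => decide (i < j))) = t.filter (fun j => decide (i < j)) := by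
        simp only [List.filter_cons]
        rw [if_neg (by simp; omega)]
      rw [this]
    rw [hbody, ih hp.tail]
    have : t.foldl (fun s j => pvStep s (j - x)) s = (t.map (fun z => z - x)).foldl pvStep s := by
      rw [List.foldl_map]
    rw [this]
    simp [pairGaps, List.foldl_append]

theorem pvOnes_filter (critical : List Int) (i : Int)
    (hi : i ∈ (PySem.List.pyRange 1 ((critical.length : Int) - 1) 1).filter
        (fun i => decide (PySem.List.pyGet? critical i = some 1))) :
    ((PySem.List.pyRange 1 ((critical.length : Int) - 1) 1).filter
        (fun i => decide (PySem.List.pyGet? critical i = some 1))).filter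
        (fun j => decide (i < j))
      = (PySem.List.pyRange (i + 1) ((critical.length : Int) - 1) 1).filter
        (fun j => decide (PySem.List.pyGet? critical j = some 1)) := by
  have hmem := List.mem_filter.mp hi
  have hir := PySem.List.mem_pyRange_one.mp hmem.1
  have hsplit : PySem.List.pyRange 1 ((critical.length : Int) - 1) 1
      = PySem.List.pyRange 1 (i + 1) 1 ++ PySem.List.pyRange (i + 1) ((critical.length : Int) - 1) 1 :=
    PySem.List.pyRange_one_append 1 (i + 1) _ (by omega) (by omega)
  rw [List.filter_filter, hsplit, List.filter_append]
  have h1 : (PySem.List.pyRange 1 (i + 1) 1).filter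
      (fun j => decide (i < j) && decide (PySem.List.pyGet? critical j = some 1)) = [] := by
    apply List.filter_eq_nil_iff.mpr
    intro j hj
    have := PySem.List.mem_pyRange_one.mp hj
    simp only [Bool.and_eq_true, decide_eq_true_eq]
    intro h
    omega
  have h2 : ∀ (p : Int → Bool), (PySem.List.pyRange (i + 1) ((critical.length : Int) - 1) 1).filter
      (fun j => decide (i < j) && p j)
      = (PySem.List.pyRange (i + 1) ((critical.length : Int) - 1) 1).filter p := by
    intro p
    apply List.filter_congr
    intro j hj
    have hj' := PySem.List.mem_pyRange_one.mp hj
    have hij : i < j := by omega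
    simp [hij]
  rw [h1, h2]
  simp

theorem pvFinal2 (n x y : Int) (rest : List Int)
    (hpw : (x :: y :: rest).Pairwise (· < ·))
    (hb : ∀ z ∈ x :: y :: rest, 1 ≤ z ∧ z < n - 1) :
    [if (pairGaps (x :: y :: rest)).foldl min n = n then -1
       else (pairGaps (x :: y :: rest)).foldl min n,
     (pairGaps (x :: y :: rest)).foldl max (-1)]
    = [(List.zipWith (fun a b => b - a) (y :: rest) rest).foldl min (y - x),
       lastInt y rest - x] := by
  have hx := hb x (by simp)
  have hy := hb y (by simp)
  have hxy : x < y := (List.pairwise_cons.mp hpw).1 y (by simp)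
  have hmin : (pairGaps (x :: y :: rest)).foldl min n
      = (List.zipWith (fun a b => b - a) (y :: rest) rest).foldl min (y - x) := by
    rw [pvPairGaps_min _ hpw]
    have hadj : adjGaps (x :: y :: rest) = (y - x) :: adjGaps (y :: rest) := by
      simp [adjGaps]
    rw [hadj]
    simp only [List.foldl_cons]
    rw [min_eq_right (by omega : y - x ≤ n)]
    rfl
  have hminlt : (pairGaps (x :: y :: rest)).foldl min n < n := by
    rw [hmin]
    have := pvFoldl_min_le (List.zipWith (fun a b => b - a) (y :: rest) rest) (y - x)
    omega
  have hmax : (pairGaps (x :: y :: rest)).foldl max (-1) = lastInt y rest - x := by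
    rw [pvPairGaps_max rest x y (-1) hpw]
    have hL : y ≤ lastInt y rest := pvLast_ge rest y hpw.tail y (by simp)
    omega
  rw [if_neg (by omega), hmin, hmax]

theorem pvMain (critical : List Int) :
    meathure_critical critical = meathure_critical_alt critical := by
  unfold meathure_critical meathure_critical_alt
  dsimp only
  set n : Int := (critical.length : Int) with hn
  set P : Int → Prop := fun i => PySem.List.pyGet? critical i = some 1 with hP
  set ones : List Int := (PySem.List.pyRange 1 (n - 1) 1).filter (fun i => decide (P i)) with hOnes
  have hpw : ones.Pairwise (· < ·) :=
    (PySem.List.pairwise_lt_pyRange_one 1 (n - 1)).filter _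
  -- step 1: rewrite A's nested fold into a fold over pairGaps ones
  have houter :
      (PySem.List.pyRange 1 (n - 1) 1).foldl
        (fun (st : Int × Int) i =>
          (PySem.List.pyRange (i + 1) (n - 1) 1).foldl
            (fun (st : Int × Int) j =>
              if PySem.List.pyGet? critical i = some 1 ∧ PySem.List.pyGet? critical j = some 1 then
                let st1 := if |i - j| < st.1 then (|i - j|, st.2) else st
                if |i - j| > st1.2 then (st1.1, |i - j|) else st1
              else st)
            st)
        (n, -1)
      = (pairGaps ones).foldl pvStep (n, -1) := by
    have hinner : ∀ (st : Int × Int) (i : Int),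
        (PySem.List.pyRange (i + 1) (n - 1) 1).foldl
          (fun (st : Int × Int) j =>
            if PySem.List.pyGet? critical i = some 1 ∧ PySem.List.pyGet? critical j = some 1 then
              let st1 := if |i - j| < st.1 then (|i - j|, st.2) else st
              if |i - j| > st1.2 then (st1.1, |i - j|) else st1
            else st)
          st
        = if P i then
            ((PySem.List.pyRange (i + 1) (n - 1) 1).filter (fun j => decide (P j))).foldl
              (fun st j => pvStep st |i - j|) st
          else st := by
      intro st i
      by_cases hpi : P i
      · rw [if_pos hpi]
        have : (fun (st : Int × Int) j =>
            if PySem.List.pyGet? critical i = some 1 ∧ PySem.List.pyGet? critical j = some 1 then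
              let st1 := if |i - j| < st.1 then (|i - j|, st.2) else st
              if |i - j| > st1.2 then (st1.1, |i - j|) else st1
            else st)
            = fun (st : Int × Int) j => if P j then pvStep st |i - j| else st := by
          funext st j
          by_cases hpj : P j
          · rw [if_pos ⟨hpi, hpj⟩, if_pos hpj, pvBodyA_eq]
          · rw [if_neg (fun h => hpj h.2), if_neg hpj]
        rw [this, pvFoldl_if_filter P]
      · rw [if_neg hpi]
        have : (fun (st : Int × Int) j =>
            if PySem.List.pyGet? critical i = some 1 ∧ PySem.List.pyGet? critical j = some 1 then
              let st1 := if |i - j| < st.1 then (|i - j|, st.2) else st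
              if |i - j| > st1.2 then (st1.1, |i - j|) else st1
            else st)
            = fun (st : Int × Int) _ => st := by
          funext st j
          exact if_neg (fun h => hpi h.1)
        rw [this, pvFoldl_const]
    calc (PySem.List.pyRange 1 (n - 1) 1).foldl
          (fun (st : Int × Int) i =>
            (PySem.List.pyRange (i + 1) (n - 1) 1).foldl
              (fun (st : Int × Int) j =>
                if PySem.List.pyGet? critical i = some 1 ∧ PySem.List.pyGet? critical j = some 1 then
                  let st1 := if |i - j| < st.1 then (|i - j|, st.2) else st
                  if |i - j| > st1.2 then (st1.1, |i - j|) else st1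
                else st)
              st)
          (n, -1)
        = (PySem.List.pyRange 1 (n - 1) 1).foldl
            (fun (st : Int × Int) i =>
              if P i then
                ((PySem.List.pyRange (i + 1) (n - 1) 1).filter (fun j => decide (P j))).foldl
                  (fun st j => pvStep st |i - j|) st
              else st)
            (n, -1) := by
          apply PySem.List.foldl_congr_mem
          intro acc i _
          exact hinner acc i
      _ = ones.foldl
            (fun (st : Int × Int) i =>
              ((PySem.List.pyRange (i + 1) (n - 1) 1).filter (fun j => decide (P j))).foldl
                (fun st j => pvStep st |i - j|) st)
            (n, -1) := by
          rw [pvFoldl_if_filter P]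
      _ = ones.foldl
            (fun (st : Int × Int) i =>
              (ones.filter (fun j => decide (i < j))).foldl
                (fun st j => pvStep st (j - i)) st)
            (n, -1) := by
          apply PySem.List.foldl_congr_mem
          intro acc i hi
          rw [pvOnes_filter critical i (by rw [hOnes] at hi; exact hi)]
          apply PySem.List.foldl_congr_mem
          intro acc2 j hj
          have hij : i < j := by
            have := List.mem_filter.mp hj
            have h2 := PySem.List.mem_pyRange_one.mp this.1
            omega
          rw [abs_sub_comm, abs_of_nonneg (by omega : (0:Int) ≤ j - i)]
      _ = (pairGaps ones).foldl pvStep (n, -1) := pvFoldl_pairs ones hpw (n, -1)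
  rw [houter, pvFoldl_pvStep]
  have hbounds : ∀ z ∈ ones, 1 ≤ z ∧ z < n - 1 := by
    intro z hz
    exact PySem.List.mem_pyRange_one.mp (List.mem_filter.mp hz).1
  clear_value ones
  clear hOnes
  rcases ones with _ | ⟨x, _ | ⟨y, rest⟩⟩
  · simp [pairGaps]
  · simp [pairGaps]
  · dsimp only
    exact pvFinal2 n x y rest hpw hbounds

-- ===== VERDICT (by name: the statement is the Claim_ definition above) =====
theorem meathure_critical_spec : Claim_equal_meathure_critical := by
  intro critical _
  unfold Spec_meathure_critical
  exact pvMain critical
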